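-- pv_equiv track=rewrite | github.com/MrBrantCode/unitest_baseline | mut_generate/mist_train_taco/taco_1279/solution.py | max_sum_of_longest_increasing_subsequence
-- ===== SOURCE A (Python) =====
-- import bisect
--
-- def max_sum_of_longest_increasing_subsequence(A):
--     lis = []
--     hist = []
--
--     for a in A:
--         i = bisect.bisect_left(lis, a)
--         if i == len(lis):
--             lis.append(a)
--             hist.append([a])
--         else:
--             lis[i] = a
--             hist[i].append(a)
--
--     ans = last = hist[-1][0]
--     for row in reversed(hist[:-1]):
--         i = bisect.bisect_left(row[::-1], last)
--         last = row[-i]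
--         ans += last
--
--     return ans
-- ===== SOURCE B (Python) =====
-- def max_sum_of_longest_increasing_subsequence(A):
--     # Classic O(n^2) DP: dp holds (value, length of longest increasing run ending there).
--     dp = []
--     for a in A:
--         l = 1 + max((l for x, l in dp if x < a), default=0)
--         dp.append((a, l))
--     m = max(l for _, l in dp)
--     prev = max(x for x, l in dp if l == m)
--     ans = prev
--     for d in range(m - 1, 0, -1):
--         prev = max(x for x, l in dp if l == d and x < prev)
--         ans += prev
--     return ans
-- ===== Notes on version B (the rewrite author's own statement) =====
-- stated objective: simpler
-- what changed: A's patience-sorting piles with bisect insertions and a bisect-on-reversed-row backward reconstruction are replaced by the classic quadratic DP that records (value, LIS-length-ending-here) pairs and then greedily takes, per length class from the top down, the largest value below the previous pick.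
import Mathlib
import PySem

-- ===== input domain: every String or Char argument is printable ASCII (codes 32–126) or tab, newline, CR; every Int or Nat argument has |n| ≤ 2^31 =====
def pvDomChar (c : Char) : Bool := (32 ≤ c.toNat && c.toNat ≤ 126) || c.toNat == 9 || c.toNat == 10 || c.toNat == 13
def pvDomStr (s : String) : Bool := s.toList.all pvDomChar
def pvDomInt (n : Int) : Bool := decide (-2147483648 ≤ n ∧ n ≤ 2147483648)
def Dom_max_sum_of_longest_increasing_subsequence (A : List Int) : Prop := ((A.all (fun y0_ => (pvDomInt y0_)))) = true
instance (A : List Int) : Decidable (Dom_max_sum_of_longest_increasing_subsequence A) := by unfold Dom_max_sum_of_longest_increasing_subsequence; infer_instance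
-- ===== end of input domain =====

-- B replaces A's patience-sorting piles + bisect-based backward reconstruction by the classic
-- quadratic DP over (value, LIS-length-ending-here) pairs with per-length greedy maxima (objective: simpler).

-- ===== PORT A =====
-- one iteration of A's first loop; state = (lis, hist)
def pvStepA (s : List Int × List (List Int)) (a : Int) : List Int × List (List Int) :=
  let i := PySem.List.bisectLeft s.1 a
  if i = s.1.length then (s.1 ++ [a], s.2 ++ [[a]])
  else (s.1.set i a, s.2.modify i (fun row => row ++ [a]))

-- one iteration of A's reconstruction loop; state = (ans, last)
def pvReconA (s : Int × Int) (row : List Int) : Int × Int :=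
  -- row[::-1] is row.reverse (slice with step -1); row[-i] via pyGetD (default unreachable: 1 ≤ i ≤ len row inside Pre_)
  let i := PySem.List.bisectLeft row.reverse s.2
  let last := PySem.List.pyGetD row (-(i : Int)) 0
  (s.1 + last, last)

def max_sum_of_longest_increasing_subsequence (A : List Int) : Int :=
  let st := A.foldl pvStepA ([], [])
  let hist := st.2
  -- ans = last = hist[-1][0]  (default unreachable for A ≠ [], the Pre_)
  let first := PySem.List.pyGetD (PySem.List.pyGetD hist (-1) []) 0 0
  -- for row in reversed(hist[:-1]): …
  let r := ((PySem.List.slice hist none (some (-1))).reverse).foldl pvReconA (first, first)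
  r.1

-- ===== PORT B =====
-- one iteration of B's DP loop: append (a, 1 + max((l for x, l in dp if x < a), default=0))
def pvStepB (dp : List (Int × Int)) (a : Int) : List (Int × Int) :=
  let l := 1 + PySem.List.maxD ((dp.filter (fun p => decide (p.1 < a))).map Prod.snd) (fun x => x) 0
  dp ++ [(a, l)]

-- one iteration of B's reconstruction loop; state = (ans, prev)
def pvReconB (dp : List (Int × Int)) (s : Int × Int) (d : Int) : Int × Int :=
  -- prev = max(x for x, l in dp if l == d and x < prev)  (empty max unreachable inside Pre_)
  let p := (PySem.List.max? ((dp.filter (fun q => decide (q.2 = d) && decide (q.1 < s.2))).map Prod.fst) (fun x => x)).getD 0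
  (s.1 + p, p)

def max_sum_of_longest_increasing_subsequence_alt (A : List Int) : Int :=
  let dp := A.foldl pvStepB []
  -- m = max(l for _, l in dp); prev = max(x for x, l in dp if l == m)  (empty max unreachable for A ≠ [])
  let m := (PySem.List.max? (dp.map Prod.snd) (fun x => x)).getD 0
  let prev := (PySem.List.max? ((dp.filter (fun q => decide (q.2 = m))).map Prod.fst) (fun x => x)).getD 0
  let r := (PySem.List.pyRange (m - 1) 0 (-1)).foldl (pvReconB dp) (prev, prev)
  r.1

-- ===== PRECONDITION & SPEC =====
-- Pre_ excludes only the empty list, on which the Python A raises IndexError (hist[-1]).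
def Pre_max_sum_of_longest_increasing_subsequence (A : List Int) : Prop := A ≠ []
instance (A : List Int) : Decidable (Pre_max_sum_of_longest_increasing_subsequence A) := by unfold Pre_max_sum_of_longest_increasing_subsequence; infer_instance
def pvWitness_max_sum_of_longest_increasing_subsequence : List Int := [1, 3, 2]

def Spec_max_sum_of_longest_increasing_subsequence (A : List Int) (out : Int) : Prop := out = max_sum_of_longest_increasing_subsequence_alt A
instance (A : List Int) (out : Int) : Decidable (Spec_max_sum_of_longest_increasing_subsequence A out) := by unfold Spec_max_sum_of_longest_increasing_subsequence; infer_instance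

-- ===== CLAIM (what is proved, stated in full; the proofs are below) =====
def Claim_equal_max_sum_of_longest_increasing_subsequence : Prop := ∀ (A : List Int), Dom_max_sum_of_longest_increasing_subsequence A → Pre_max_sum_of_longest_increasing_subsequence A → Spec_max_sum_of_longest_increasing_subsequence A (max_sum_of_longest_increasing_subsequence A)

-- ===== LEMMAS AND PROOFS =====

-- the last element of a non-increasing list is a lower bound for its members
lemma pvLast_le {xs : List Int} {m : Int} (hp : List.Pairwise (fun x y => y ≤ x) xs)
    (hl : xs.getLast? = some m) : ∀ x ∈ xs, m ≤ x := by
  obtain ⟨ys, rfl⟩ := List.getLast?_eq_some_iff.mp hl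
  rw [List.pairwise_append] at hp
  intro x hx
  rcases List.mem_append.mp hx with h | h
  · exact hp.2.2 x h m (by simp)
  · simp at h; omega

-- the head of a non-increasing list is an upper bound for its members
lemma pvHead_ge {h : Int} {t : List Int} (hp : List.Pairwise (fun x y => y ≤ x) (h :: t)) :
    ∀ x ∈ h :: t, x ≤ h := by
  rw [List.pairwise_cons] at hp
  intro x hx
  rcases List.mem_cons.mp hx with rfl | h'
  · exact le_refl x
  · exact hp.1 x h'

-- max(xs) (with any default) is the stated value when a greatest member is known
lemma pvMax?_getD_eq {xs : List Int} {v : Int} (hv : v ∈ xs) (hmax : ∀ x ∈ xs, x ≤ v) :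
    (PySem.List.max? xs (fun x => x)).getD 0 = v := by
  cases h : PySem.List.max? xs (fun x => x) with
  | none => rw [PySem.List.max?_eq_none_iff] at h; subst h; cases hv
  | some m =>
    have h1 := PySem.List.max?_mem h
    have h2 := PySem.List.max?_isMax h
    have e1 := hmax m h1
    have e2 := h2 v hv
    simp only [Option.getD_some]
    omega

-- facts about max(xs, default=0)
lemma pvMaxD_facts (S : List Int) :
    (∀ s ∈ S, s ≤ PySem.List.maxD S (fun x => x) 0) ∧
    (PySem.List.maxD S (fun x => x) 0 = 0 ∨ PySem.List.maxD S (fun x => x) 0 ∈ S) := by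
  unfold PySem.List.maxD
  cases h : PySem.List.max? S (fun x => x) with
  | none => rw [PySem.List.max?_eq_none_iff] at h; subst h; simp
  | some m =>
    have h1 := PySem.List.max?_mem h
    have h2 := PySem.List.max?_isMax h
    simp only [Option.getD_some]
    exact ⟨h2, Or.inr h1⟩

-- Python xs[-i] for 1 ≤ i ≤ len(xs)
lemma pvPyGetD_neg {α : Type} (xs : List α) (i : Nat) (d : α) (h1 : 1 ≤ i) (h2 : i ≤ xs.length) :
    PySem.List.pyGetD xs (-(i : Int)) d = xs[xs.length - i]'(by omega) := by
  simp only [PySem.List.pyGetD, PySem.List.pyGet?, PySem.List.pyIdx?]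
  have hni : ¬ (0 ≤ -(i : Int)) := by omega
  rw [if_neg hni, if_pos (by omega)]
  simp only [Option.bind_some, neg_neg, Int.toNat_natCast]
  rw [List.getElem?_eq_getElem (by omega)]
  rfl

-- the loop invariant tying A's piles (lis, hist) to B's dp list
def pvInv (dp : List (Int × Int)) (lis : List Int) (hist : List (List Int)) : Prop :=
  lis.length = hist.length ∧
  (∀ p ∈ dp, 1 ≤ p.2 ∧ p.2 ≤ (hist.length : Int)) ∧
  (∀ (d : Nat) (hd : d < hist.length),
      hist[d] = (dp.filter (fun p => decide (p.2 = (d : Int) + 1))).map Prod.fst) ∧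
  (∀ (d : Nat) (hd : d < hist.length), hist[d] ≠ []) ∧
  (∀ (d : Nat) (hd : d < hist.length) (hd' : d < lis.length), hist[d].getLast? = some lis[d]) ∧
  List.Pairwise (· < ·) lis ∧
  (∀ (d : Nat) (hd : d < hist.length), List.Pairwise (fun x y => y ≤ x) hist[d]) ∧
  (∀ p ∈ dp, 2 ≤ p.2 → ∃ y, (y, p.2 - 1) ∈ dp ∧ y < p.1)

lemma pvMem_pile {dp : List (Int × Int)} {lis : List Int} {hist : List (List Int)}
    (hInv : pvInv dp lis hist) {d : Nat} (hd : d < hist.length) {x : Int} :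
    x ∈ hist[d] ↔ (x, (d : Int) + 1) ∈ dp := by
  rw [hInv.2.2.1 d hd]
  simp only [List.mem_map, List.mem_filter]
  constructor
  · rintro ⟨p, ⟨hp, h2⟩, rfl⟩
    simp only [decide_eq_true_eq] at h2
    have : p = (p.1, (d : Int) + 1) := by rw [← h2]
    rwa [← this]
  · intro hmem
    exact ⟨(x, (d : Int) + 1), ⟨hmem, by simp⟩, rfl⟩

-- bisect_left(lis, a) equals B's DP value: 1 + max(l for x,l in dp if x < a) - 1
lemma pvBisect_eq {dp : List (Int × Int)} {lis : List Int} {hist : List (List Int)}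
    (hInv : pvInv dp lis hist) (a : Int) :
    0 ≤ PySem.List.maxD ((dp.filter (fun p => decide (p.1 < a))).map Prod.snd) (fun x => x) 0 ∧
    (PySem.List.maxD ((dp.filter (fun p => decide (p.1 < a))).map Prod.snd) (fun x => x) 0).toNat ≤ lis.length ∧
    PySem.List.bisectLeft lis a =
      (PySem.List.maxD ((dp.filter (fun p => decide (p.1 < a))).map Prod.snd) (fun x => x) 0).toNat ∧
    (∀ (d : Nat) (hd : d < lis.length),
      d < (PySem.List.maxD ((dp.filter (fun p => decide (p.1 < a))).map Prod.snd) (fun x => x) 0).toNat →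
      lis[d] < a) ∧
    (∀ (h : (PySem.List.maxD ((dp.filter (fun p => decide (p.1 < a))).map Prod.snd) (fun x => x) 0).toNat < lis.length),
      a ≤ lis[(PySem.List.maxD ((dp.filter (fun p => decide (p.1 < a))).map Prod.snd) (fun x => x) 0).toNat]'h) ∧
    (1 ≤ PySem.List.maxD ((dp.filter (fun p => decide (p.1 < a))).map Prod.snd) (fun x => x) 0 →
      ∃ y, (y, PySem.List.maxD ((dp.filter (fun p => decide (p.1 < a))).map Prod.snd) (fun x => x) 0) ∈ dp ∧ y < a) := by
  obtain ⟨hlen, hbnd, hchar, hne, hlast, hpw, hrow, hex⟩ := hInv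
  have hInv' : pvInv dp lis hist := ⟨hlen, hbnd, hchar, hne, hlast, hpw, hrow, hex⟩
  set S := (dp.filter (fun p => decide (p.1 < a))).map Prod.snd with hS
  set M := PySem.List.maxD S (fun x => x) 0 with hM
  obtain ⟨hS1, hS2⟩ := pvMaxD_facts S
  have hSmem : ∀ s ∈ S, ∃ p ∈ dp, p.1 < a ∧ p.2 = s := by
    intro s hs
    rw [hS] at hs
    simp only [List.mem_map, List.mem_filter, decide_eq_true_eq] at hs
    obtain ⟨p, ⟨hp, hpa⟩, rfl⟩ := hs
    exact ⟨p, hp, hpa, rfl⟩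
  have hSmem' : ∀ p ∈ dp, p.1 < a → p.2 ∈ S := by
    intro p hp hpa
    rw [hS]
    simp only [List.mem_map, List.mem_filter, decide_eq_true_eq]
    exact ⟨p, ⟨hp, hpa⟩, rfl⟩
  have hM0 : 0 ≤ M := by
    rcases hS2 with h | h
    · omega
    · obtain ⟨p, hp, _, hps⟩ := hSmem M h
      have := (hbnd p hp).1; omega
  have hMle : M ≤ (lis.length : Int) := by
    rcases hS2 with h | h
    · omega
    · obtain ⟨p, hp, _, hps⟩ := hSmem M h
      have := (hbnd p hp).2; omega
  have hA : ∀ (d : Nat) (hd : d < lis.length), d < M.toNat → lis[d] < a := by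
    intro d hd hdM
    have hMS : M ∈ S := by
      rcases hS2 with h | h
      · omega
      · exact h
    obtain ⟨p, hp, hpa, hps⟩ := hSmem M hMS
    have he : (M.toNat - 1) < hist.length := by omega
    have hpm : p.1 ∈ hist[M.toNat - 1] := by
      rw [pvMem_pile hInv' he]
      have h2 : ((M.toNat - 1 : Nat) : Int) + 1 = p.2 := by omega
      rw [h2]
      simpa using hp
    have hle : lis[M.toNat - 1]'(by omega) ≤ p.1 :=
      pvLast_le (hrow _ he) (hlast _ he (by omega)) _ hpm
    rcases Nat.lt_or_ge d (M.toNat - 1) with hcase | hcase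
    · have := List.pairwise_iff_getElem.mp hpw d (M.toNat - 1) hd (by omega) hcase
      omega
    · have hde : d = M.toNat - 1 := by omega
      subst hde
      omega
  have hB : ∀ (hlt2 : M.toNat < lis.length), a ≤ lis[M.toNat]'hlt2 := by
    intro hlt2
    by_contra h'
    rw [not_le] at h'
    have hmem : lis[M.toNat] ∈ hist[M.toNat]'(by omega) := by
      have := hlast M.toNat (by omega) hlt2
      exact List.mem_of_getLast? this
    have hdp : (lis[M.toNat], (M.toNat : Int) + 1) ∈ dp :=
      (pvMem_pile hInv' (by omega)).mp hmem
    have := hS1 _ (hSmem' _ hdp h')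
    omega
  have hwit : 1 ≤ M → ∃ y, (y, M) ∈ dp ∧ y < a := by
    intro h1
    have hMS : M ∈ S := by
      rcases hS2 with h | h
      · omega
      · exact h
    obtain ⟨p, hp, hpa, hps⟩ := hSmem M hMS
    refine ⟨p.1, ?_, hpa⟩
    have : p = (p.1, M) := by rw [← hps]
    rwa [← this]
  have hsorted : List.Pairwise (· ≤ ·) lis := hpw.imp (fun h => le_of_lt h)
  obtain ⟨hi_le, hspec1, hspec2⟩ := PySem.List.bisectLeft_spec lis a hsorted
  refine ⟨hM0, by omega, ?_, hA, hB, hwit⟩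
  by_contra hne'
  rcases Nat.lt_or_ge (PySem.List.bisectLeft lis a) M.toNat with h | h
  · have hx : PySem.List.bisectLeft lis a < lis.length := by omega
    have h1 := hspec2 _ hx (le_refl _)
    have h2 := hA _ hx h
    omega
  · have h' : M.toNat < PySem.List.bisectLeft lis a := by omega
    have hlt2 : M.toNat < lis.length := by omega
    have h1 := hspec1 M.toNat hlt2 h'
    have h2 := hB hlt2
    omega

lemma pvInv_step {dp : List (Int × Int)} {lis : List Int} {hist : List (List Int)}
    (hInv : pvInv dp lis hist) (a : Int) :
    pvInv (pvStepB dp a) (pvStepA (lis, hist) a).1 (pvStepA (lis, hist) a).2 := by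
  obtain ⟨hM0, hMle, hBeq, hA, hBub, hwit⟩ := pvBisect_eq hInv a
  obtain ⟨hlen, hbnd, hchar, hne, hlast, hpw, hrow, hex⟩ := hInv
  have hstepB : pvStepB dp a
      = dp ++ [(a, 1 + PySem.List.maxD ((dp.filter (fun p => decide (p.1 < a))).map Prod.snd) (fun x => x) 0)] := rfl
  rw [hstepB]
  generalize hMg : PySem.List.maxD ((dp.filter (fun p => decide (p.1 < a))).map Prod.snd) (fun x => x) 0 = M
    at hM0 hMle hBeq hA hBub hwit ⊢
  by_cases hc : PySem.List.bisectLeft lis a = lis.length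
  · -- append case: i == len(lis)
    have hMn : M.toNat = hist.length := by rw [← hlen, ← hBeq, hc]
    have hMeq : M = (hist.length : Int) := by rw [← hMn, Int.toNat_of_nonneg hM0]
    have hstepA : pvStepA (lis, hist) a = (lis ++ [a], hist ++ [[a]]) := by
      simp only [pvStepA]; rw [if_pos hc]
    rw [hstepA]
    refine ⟨by simp [hlen], ?_, ?_, ?_, ?_, ?_, ?_, ?_⟩
    · intro p hp
      rcases List.mem_append.mp hp with h | h
      · have h2 := hbnd p h
        simp only [List.length_append, List.length_cons, List.length_nil]
        push_cast
        omega
      · simp at h; subst h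
        simp only [List.length_append, List.length_cons, List.length_nil]
        push_cast
        omega
    · intro d hd
      simp only [List.length_append, List.length_cons, List.length_nil] at hd
      rcases Nat.lt_or_ge d hist.length with h | h
      · rw [List.getElem_append_left h, hchar d h, List.filter_append]
        have hnil : List.filter (fun p : Int × Int => decide (p.2 = (d : Int) + 1)) [(a, 1 + M)] = [] := by
          simp only [List.filter_cons, List.filter_nil, decide_eq_true_eq]
          rw [if_neg (by omega)]
        rw [hnil, List.append_nil]
      · have hd' : d = hist.length := by omega
        subst hd'
        rw [List.getElem_append_right (le_refl _)]
        have hnil : List.filter (fun p : Int × Int => decide (p.2 = (hist.length : Int) + 1)) dp = [] := by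
          rw [List.filter_eq_nil_iff]
          intro p hp
          have := hbnd p hp
          simp only [decide_eq_true_eq]
          omega
        rw [List.filter_append, hnil, List.nil_append]
        simp only [List.filter_cons, List.filter_nil, decide_eq_true_eq]
        rw [if_pos (by omega)]
        simp
    · intro d hd
      simp only [List.length_append, List.length_cons, List.length_nil] at hd
      rcases Nat.lt_or_ge d hist.length with h | h
      · rw [List.getElem_append_left h]; exact hne d h
      · have hd' : d = hist.length := by omega
        subst hd'
        rw [List.getElem_append_right (le_refl _)]
        simp
    · intro d hd hd'
      simp only [List.length_append, List.length_cons, List.length_nil] at hd hd'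
      rcases Nat.lt_or_ge d hist.length with h | h
      · rw [List.getElem_append_left h, List.getElem_append_left (by omega)]
        exact hlast d h (by omega)
      · have hd2 : d = hist.length := by omega
        subst hd2
        rw [List.getElem_append_right (le_refl _), List.getElem_append_right (by omega)]
        simp [hlen]
    · rw [List.pairwise_append]
      refine ⟨hpw, by simp, ?_⟩
      intro x hx b hb
      simp only [List.mem_singleton] at hb
      subst hb
      obtain ⟨d, hd, rfl⟩ := List.mem_iff_getElem.mp hx
      exact hA d hd (by omega)
    · intro d hd
      simp only [List.length_append, List.length_cons, List.length_nil] at hd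
      rcases Nat.lt_or_ge d hist.length with h | h
      · rw [List.getElem_append_left h]; exact hrow d h
      · have hd' : d = hist.length := by omega
        subst hd'
        rw [List.getElem_append_right (le_refl _)]
        simp
    · intro p hp h2
      rcases List.mem_append.mp hp with h | h
      · obtain ⟨y, hy, hylt⟩ := hex p h h2
        exact ⟨y, List.mem_append_left _ hy, hylt⟩
      · simp at h; subst h
        obtain ⟨y, hy, hylt⟩ := hwit (by omega)
        refine ⟨y, List.mem_append_left _ ?_, hylt⟩
        have hmm : (1 : Int) + M - 1 = M := by ring
        rw [hmm]
        exact hy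
  · -- replace case: i < len(lis)
    have hilt : M.toNat < lis.length := by
      rw [hBeq] at hc; omega
    have hihist : M.toNat < hist.length := by omega
    have hMeq : M = (M.toNat : Int) := (Int.toNat_of_nonneg hM0).symm
    have hstepA : pvStepA (lis, hist) a
        = (lis.set (PySem.List.bisectLeft lis a) a,
           hist.modify (PySem.List.bisectLeft lis a) (fun row => row ++ [a])) := by
      simp only [pvStepA]; rw [if_neg hc]
    rw [hstepA, hBeq]
    have hale : a ≤ lis[M.toNat]'hilt := hBub hilt
    refine ⟨by simp [hlen], ?_, ?_, ?_, ?_, ?_, ?_, ?_⟩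
    · intro p hp
      rcases List.mem_append.mp hp with h | h
      · have := hbnd p h; simp only [List.length_modify]; omega
      · simp at h; subst h
        simp only [List.length_modify]
        constructor; · omega
        · omega
    · intro d hd
      simp only [List.length_modify] at hd
      rw [List.getElem_modify, List.filter_append]
      by_cases hdi : M.toNat = d
      · subst hdi
        rw [if_pos rfl, hchar M.toNat hihist]
        have hone : List.filter (fun p : Int × Int => decide (p.2 = (M.toNat : Int) + 1)) [(a, 1 + M)]
            = [(a, 1 + M)] := by
          simp only [List.filter_cons, List.filter_nil, decide_eq_true_eq]
          rw [if_pos (by omega)]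
        rw [hone, List.map_append]
        simp
      · rw [if_neg hdi, hchar d hd]
        have hnil : List.filter (fun p : Int × Int => decide (p.2 = (d : Int) + 1)) [(a, 1 + M)] = [] := by
          simp only [List.filter_cons, List.filter_nil, decide_eq_true_eq]
          rw [if_neg (by omega)]
        rw [hnil, List.append_nil]
    · intro d hd
      simp only [List.length_modify] at hd
      rw [List.getElem_modify]
      by_cases hdi : M.toNat = d
      · rw [if_pos hdi]; simp
      · rw [if_neg hdi]; exact hne d hd
    · intro d hd hd'
      simp only [List.length_modify] at hd
      simp only [List.length_set] at hd'
      rw [List.getElem_modify]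
      by_cases hdi : M.toNat = d
      · subst hdi
        rw [if_pos rfl, List.getLast?_concat, List.getElem_set_self]
      · rw [if_neg hdi, List.getElem_set_ne hdi]
        exact hlast d hd hd'
    · rw [List.pairwise_iff_getElem]
      intro i1 j1 hi1 hj1 hij
      simp only [List.length_set] at hi1 hj1
      have hgetI := List.pairwise_iff_getElem.mp hpw
      by_cases h1 : M.toNat = i1
      · subst h1
        rw [List.getElem_set_self, List.getElem_set_ne (by omega)]
        have := hgetI M.toNat j1 hi1 hj1 hij
        omega
      · rw [List.getElem_set_ne h1]
        by_cases h2 : M.toNat = j1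
        · subst h2
          rw [List.getElem_set_self]
          exact hA i1 hi1 (by omega)
        · rw [List.getElem_set_ne h2]
          exact hgetI i1 j1 hi1 hj1 hij
    · intro d hd
      simp only [List.length_modify] at hd
      rw [List.getElem_modify]
      by_cases hdi : M.toNat = d
      · subst hdi
        rw [if_pos rfl, List.pairwise_append]
        refine ⟨hrow M.toNat hihist, by simp, ?_⟩
        intro x hx b hb
        simp only [List.mem_singleton] at hb
        subst hb
        have hmin := pvLast_le (hrow M.toNat hihist) (hlast M.toNat hihist hilt) x hx
        omega
      · rw [if_neg hdi]; exact hrow d hd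
    · intro p hp h2
      rcases List.mem_append.mp hp with h | h
      · obtain ⟨y, hy, hylt⟩ := hex p h h2
        exact ⟨y, List.mem_append_left _ hy, hylt⟩
      · simp at h; subst h
        obtain ⟨y, hy, hylt⟩ := hwit (by omega)
        refine ⟨y, List.mem_append_left _ ?_, hylt⟩
        have hmm : (1 : Int) + M - 1 = M := by ring
        rw [hmm]
        exact hy

lemma pvInv_foldl : ∀ (P : List Int) (dp : List (Int × Int)) (s : List Int × List (List Int)),
    pvInv dp s.1 s.2 → pvInv (P.foldl pvStepB dp) (P.foldl pvStepA s).1 (P.foldl pvStepA s).2 := by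
  intro P
  induction P with
  | nil => intro dp s h; exact h
  | cons a P ih =>
    intro dp s h
    simp only [List.foldl_cons]
    exact ih (pvStepB dp a) (pvStepA s a) (by
      have := pvInv_step (dp := dp) (lis := s.1) (hist := s.2) h a
      simpa using this)

lemma pvDpB_length : ∀ (P : List Int) (dp : List (Int × Int)),
    (P.foldl pvStepB dp).length = dp.length + P.length := by
  intro P
  induction P with
  | nil => simp
  | cons a P ih => intro dp; simp [List.foldl_cons, ih, pvStepB]; omega

-- A's bisect pick on a non-increasing row = the greatest member below prev
lemma pvPick {row : List Int} {prev : Int} (hp : List.Pairwise (fun x y => y ≤ x) row)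
    {x0 : Int} (hx0 : x0 ∈ row) (hx0lt : x0 < prev) :
    ∃ v, v ∈ row ∧ v < prev ∧
      PySem.List.pyGetD row (-(PySem.List.bisectLeft row.reverse prev : Int)) 0 = v ∧
      (∀ x ∈ row, x < prev → x ≤ v) := by
  have hrev : List.Pairwise (· ≤ ·) row.reverse := by
    rw [List.pairwise_reverse]; exact hp
  obtain ⟨hle, hs1, hs2⟩ := PySem.List.bisectLeft_spec row.reverse prev hrev
  set i := PySem.List.bisectLeft row.reverse prev with hi
  have hlenr : row.reverse.length = row.length := List.length_reverse
  obtain ⟨j, hj, hjx⟩ := List.getElem_of_mem (List.mem_reverse.mpr hx0)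
  have hi1 : 1 ≤ i := by
    by_contra h
    have h0 : i = 0 := by omega
    have := hs2 j (by omega) (by omega)
    rw [hjx] at this; omega
  have hiL : i ≤ row.length := by omega
  refine ⟨row.reverse[i - 1]'(by omega), ?_, ?_, ?_, ?_⟩
  · exact List.mem_reverse.mp (List.getElem_mem _)
  · exact hs1 (i - 1) (by omega) (by omega)
  · rw [pvPyGetD_neg row i 0 hi1 hiL, List.getElem_reverse]
    congr 1
    omega
  · intro x hx hxlt
    obtain ⟨k, hk, hkx⟩ := List.getElem_of_mem (List.mem_reverse.mpr hx)
    have hki : k < i := by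
      by_contra h
      have := hs2 k (by omega) (by omega)
      rw [hkx] at this; omega
    rcases Nat.lt_or_ge k (i - 1) with h | h
    · have := List.pairwise_iff_getElem.mp hrev k (i - 1) (by omega) (by omega) h
      rw [hkx] at this; exact this
    · have hk1 : k = i - 1 := by omega
      subst hk1; rw [← hkx]

-- the two reconstruction loops agree step by step
lemma pvLoop {dp : List (Int × Int)} {lis : List Int} {hist : List (List Int)}
    (hInv : pvInv dp lis hist) :
    ∀ (t : Nat) (ht : t < hist.length) (ans prev : Int), prev ∈ hist[t] →
      ((hist.take t).reverse).foldl pvReconA (ans, prev)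
        = (PySem.List.pyRange (t : Int) 0 (-1)).foldl (pvReconB dp) (ans, prev) := by
  intro t
  induction t with
  | zero =>
    intro ht ans prev hprev
    rw [PySem.List.pyRange_neg_one_eq_nil (by omega)]
    simp
  | succ s ih =>
    intro ht ans prev hprev
    have htake : (hist.take (s + 1)).reverse = hist[s] :: (hist.take s).reverse := by
      rw [List.take_add_one, List.getElem?_eq_getElem (by omega)]
      simp
    have hcast : ((s + 1 : Nat) : Int) - 1 = ((s : Nat) : Int) := by push_cast; ring
    have hrange : PySem.List.pyRange ((s + 1 : Nat) : Int) 0 (-1)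
        = ((s + 1 : Nat) : Int) :: PySem.List.pyRange ((s : Nat) : Int) 0 (-1) := by
      rw [PySem.List.pyRange_neg_one_cons (by omega), hcast]
    rw [htake, hrange, List.foldl_cons, List.foldl_cons]
    have hfl : ((dp.filter (fun q => decide (q.2 = ((s + 1 : Nat) : Int)) && decide (q.1 < prev))).map Prod.fst)
        = hist[s].filter (fun x => decide (x < prev)) := by
      have hcomm : (fun q : Int × Int => decide (q.2 = ((s + 1 : Nat) : Int)) && decide (q.1 < prev))
          = fun q : Int × Int => decide (q.1 < prev) && decide (q.2 = ((s + 1 : Nat) : Int)) := by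
        funext q; rw [Bool.and_comm]
      rw [hcomm, ← List.filter_filter]
      have hmapfst : (List.filter (fun q : Int × Int => decide (q.1 < prev))
            (dp.filter (fun q : Int × Int => decide (q.2 = ((s + 1 : Nat) : Int))))).map Prod.fst
          = ((dp.filter (fun q : Int × Int => decide (q.2 = ((s + 1 : Nat) : Int)))).map Prod.fst).filter
              (fun x => decide (x < prev)) := by
        rw [List.filter_map]; rfl
      rw [hmapfst]
      congr 1
      have hc2 : ((s + 1 : Nat) : Int) = ((s : Nat) : Int) + 1 := by push_cast; ring
      rw [hc2, hInv.2.2.1 s (by omega)]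
    have hdpprev : (prev, ((s + 1 : Nat) : Int) + 1) ∈ dp := (pvMem_pile hInv ht).mp hprev
    obtain ⟨y, hy, hylt⟩ := hInv.2.2.2.2.2.2.2 _ hdpprev (by
      simp only []
      omega)
    have hy' : y ∈ hist[s] := by
      apply (pvMem_pile hInv (show s < hist.length by omega)).mpr
      have hc : ((s + 1 : Nat) : Int) + 1 - 1 = ((s : Nat) : Int) + 1 := by push_cast; ring
      rwa [hc] at hy
    obtain ⟨v, hv_mem, hv_lt, hv_get, hv_max⟩ :=
      pvPick (hInv.2.2.2.2.2.2.1 s (by omega)) hy' hylt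
    have hstepA : pvReconA (ans, prev) hist[s] = (ans + v, v) := by
      simp only [pvReconA]; rw [hv_get]
    have hstepB : pvReconB dp (ans, prev) ((s + 1 : Nat) : Int) = (ans + v, v) := by
      simp only [pvReconB]
      rw [hfl]
      have hmx : (PySem.List.max? (hist[s].filter (fun x => decide (x < prev))) (fun x => x)).getD 0 = v := by
        apply pvMax?_getD_eq
        · rw [List.mem_filter]; exact ⟨hv_mem, by simpa using hv_lt⟩
        · intro x hx; rw [List.mem_filter] at hx; exact hv_max x hx.1 (by simpa using hx.2)
      rw [hmx]
    rw [hstepA, hstepB]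
    exact ih (by omega) (ans + v) v hv_mem

-- assembling the whole equality from the invariant after A's first loop
lemma pvFinal {dp : List (Int × Int)} {lis : List Int} {hist : List (List Int)}
    (hInv : pvInv dp lis hist) (hdp : dp ≠ []) :
    (((PySem.List.slice hist none (some (-1))).reverse).foldl pvReconA
        (PySem.List.pyGetD (PySem.List.pyGetD hist (-1) []) 0 0,
         PySem.List.pyGetD (PySem.List.pyGetD hist (-1) []) 0 0)).1
    = ((PySem.List.pyRange ((PySem.List.max? (dp.map Prod.snd) (fun x => x)).getD 0 - 1) 0 (-1)).foldl
        (pvReconB dp)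
        ((PySem.List.max? ((dp.filter (fun q =>
            decide (q.2 = (PySem.List.max? (dp.map Prod.snd) (fun x => x)).getD 0))).map Prod.fst)
            (fun x => x)).getD 0,
         (PySem.List.max? ((dp.filter (fun q =>
            decide (q.2 = (PySem.List.max? (dp.map Prod.snd) (fun x => x)).getD 0))).map Prod.fst)
            (fun x => x)).getD 0)).1 := by
  obtain ⟨p0, hp0⟩ := List.exists_mem_of_ne_nil dp hdp
  have hn1 : 1 ≤ hist.length := by
    have := (hInv.2.1 p0 hp0); omega
  have hc1 : ((hist.length - 1 : Nat) : Int) + 1 = (hist.length : Int) := by omega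
  have hm : (PySem.List.max? (dp.map Prod.snd) (fun x => x)).getD 0 = (hist.length : Int) := by
    apply pvMax?_getD_eq
    · obtain ⟨x, hx⟩ := List.exists_mem_of_ne_nil _ (hInv.2.2.2.1 (hist.length - 1) (by omega))
      have hxd := (pvMem_pile hInv (show hist.length - 1 < hist.length by omega)).mp hx
      rw [← hc1]
      exact List.mem_map.mpr ⟨_, hxd, rfl⟩
    · intro l hl
      obtain ⟨p, hp, rfl⟩ := List.mem_map.mp hl
      exact (hInv.2.1 p hp).2
  have hBlist : (dp.filter (fun q => decide (q.2 = (hist.length : Int)))).map Prod.fst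
      = hist[hist.length - 1]'(by omega) := by
    rw [hInv.2.2.1 (hist.length - 1) (by omega), hc1]
  have hneg : PySem.List.pyGetD hist (-1) ([] : List Int) = hist[hist.length - 1]'(by omega) := by
    have h1 : (-1 : Int) = -((1 : Nat) : Int) := by norm_num
    rw [h1, pvPyGetD_neg hist 1 ([] : List Int) (le_refl 1) (by omega)]
  have hrowne := hInv.2.2.2.1 (hist.length - 1) (by omega)
  obtain ⟨h0, t0, hrow0⟩ := List.exists_cons_of_ne_nil hrowne
  have hhead : PySem.List.pyGetD (hist[hist.length - 1]'(by omega)) 0 0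
      = (hist[hist.length - 1]'(by omega))[0]'(by rw [hrow0]; simp) := by
    rw [PySem.List.pyGetD_eq_getElem _ _ (le_refl 0) (by rw [hrow0]; simp)]
    rfl
  have hheadmem : (hist[hist.length - 1]'(by omega))[0]'(by rw [hrow0]; simp)
      ∈ hist[hist.length - 1]'(by omega) := List.getElem_mem _
  have hheadmax : ∀ x ∈ hist[hist.length - 1]'(by omega),
      x ≤ (hist[hist.length - 1]'(by omega))[0]'(by rw [hrow0]; simp) := by
    have hpw := hInv.2.2.2.2.2.2.1 (hist.length - 1) (by omega)
    intro x hx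
    have h00 : (hist[hist.length - 1]'(by omega))[0]'(by rw [hrow0]; simp) = h0 := by
      rw [List.getElem_of_eq hrow0]; rfl
    rw [h00]
    rw [hrow0] at hpw hx
    exact pvHead_ge hpw x hx
  have hprev : (PySem.List.max? ((dp.filter (fun q =>
        decide (q.2 = (PySem.List.max? (dp.map Prod.snd) (fun x => x)).getD 0))).map Prod.fst)
        (fun x => x)).getD 0
      = (hist[hist.length - 1]'(by omega))[0]'(by rw [hrow0]; simp) := by
    rw [hm, hBlist]
    exact pvMax?_getD_eq hheadmem hheadmax
  have hslice : PySem.List.slice hist none (some (-1)) = hist.take (hist.length - 1) := by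
    have hds : PySem.List.slice hist none (some (-1)) = hist.dropLast := by simp [pysem]
    rw [hds, List.dropLast_eq_take]
  have hrange : (PySem.List.max? (dp.map Prod.snd) (fun x => x)).getD 0 - 1
      = ((hist.length - 1 : Nat) : Int) := by rw [hm]; omega
  rw [hneg, hhead, hprev, hslice, hrange]
  rw [pvLoop hInv (hist.length - 1) (by omega) _ _ hheadmem]

-- ===== VERDICT (by name: the statement is the Claim_ definition above) =====
theorem max_sum_of_longest_increasing_subsequence_spec : Claim_equal_max_sum_of_longest_increasing_subsequence := by
  intro A _hDom hPre
  unfold Spec_max_sum_of_longest_increasing_subsequence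
  unfold max_sum_of_longest_increasing_subsequence max_sum_of_longest_increasing_subsequence_alt
  have hbase : pvInv [] [] [] := by
    refine ⟨rfl, ?_, ?_, ?_, ?_, ?_, ?_, ?_⟩ <;> simp
  have hInv := pvInv_foldl A [] ([], []) hbase
  have hdplen : (A.foldl pvStepB []).length = A.length := by
    have := pvDpB_length A []; simpa using this
  have hdp : A.foldl pvStepB [] ≠ [] := by
    intro h
    rw [h] at hdplen
    exact hPre (List.length_eq_zero_iff.mp hdplen.symm)
  exact pvFinal hInv hdp
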